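-- pv_equiv track=rewrite | github.com/Elia1996/Travulog | travulog.py | GetStringIndent
-- ===== SOURCE A (Python) =====
-- def GetStringIndent( stringa, indent=1):
--     #######################################################################
--     # Find the current indentation of "stringa", this
--     # function return the number of space before the first letter
--     #######################################################################
--     endindent=0
--     indent_cnt=0
--     for letter in stringa:
--         if not endindent:
--             if letter==" ":
--                indent_cnt+=1
--             else:
--                 return indent_cnt//indent
-- ===== SOURCE B (Python) =====
-- def GetStringIndent(stringa, indent=1):
--     stripped = stringa.lstrip(" ")
--     if not stripped:
--         return None
--     return (len(stringa) - len(stripped)) // indent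
-- ===== Notes on version B (the rewrite author's own statement) =====
-- stated objective: idiomatic
-- what changed: Replaces A's char-by-char early-exit loop with a counter by a single lstrip(" ") and a length-difference division.
-- outside the precondition, e.g. on GetStringIndent('a', 0): A raises ZeroDivisionError, B raises ZeroDivisionError
import Mathlib
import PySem

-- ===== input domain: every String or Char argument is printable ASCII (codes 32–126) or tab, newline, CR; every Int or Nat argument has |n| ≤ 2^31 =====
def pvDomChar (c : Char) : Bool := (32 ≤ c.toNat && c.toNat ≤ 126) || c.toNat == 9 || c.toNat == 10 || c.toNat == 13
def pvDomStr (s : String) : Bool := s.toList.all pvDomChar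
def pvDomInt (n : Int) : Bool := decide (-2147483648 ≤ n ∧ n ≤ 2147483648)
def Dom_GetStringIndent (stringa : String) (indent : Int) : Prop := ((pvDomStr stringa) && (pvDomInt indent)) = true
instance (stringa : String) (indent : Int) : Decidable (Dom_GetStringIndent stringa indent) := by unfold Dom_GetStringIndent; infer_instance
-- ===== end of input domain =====

-- B replaces A's char-by-char early-exit counting loop with one lstrip(" ") plus a length difference (idiomatic).

-- ===== PORT A =====
-- loop over the characters, carrying endindent (never modified) and indent_cnt
def GetStringIndentGo (l : List Char) (indent : Int) (endindent : Int) (indent_cnt : Int) : Option Int :=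
  match l with
  | [] => none
  | letter :: rest =>
    if endindent == 0 then
      if letter = ' ' then GetStringIndentGo rest indent endindent (indent_cnt + 1)
      else some (PySem.Int.floordiv indent_cnt indent)
    else GetStringIndentGo rest indent endindent indent_cnt

def GetStringIndent (stringa : String) (indent : Int) : Option Int :=
  GetStringIndentGo stringa.toList indent 0 0

-- ===== PORT B =====
-- stringa.lstrip(" ") ported as dropWhile (· == ' ') on the character list
def GetStringIndent_alt (stringa : String) (indent : Int) : Option Int :=
  let stripped := stringa.toList.dropWhile (· == ' ')
  if stripped.isEmpty then none
  else some (PySem.Int.floordiv ((stringa.toList.length : Int) - (stripped.length : Int)) indent)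

-- ===== PRECONDITION & SPEC =====
-- Pre_ excludes exactly the inputs on which Python A raises ZeroDivisionError:
-- indent = 0 with a non-space character present (B raises there too).
def Pre_GetStringIndent (stringa : String) (indent : Int) : Prop :=
  indent ≠ 0 ∨ stringa.toList.all (· == ' ') = true
instance (stringa : String) (indent : Int) : Decidable (Pre_GetStringIndent stringa indent) := by
  unfold Pre_GetStringIndent; infer_instance

def pvWitness_GetStringIndent : String × Int := ("  ab", 2)

def Spec_GetStringIndent (stringa : String) (indent : Int) (out : Option Int) : Prop := out = GetStringIndent_alt stringa indent
instance (stringa : String) (indent : Int) (out : Option Int) : Decidable (Spec_GetStringIndent stringa indent out) := by unfold Spec_GetStringIndent; infer_instance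

-- ===== CLAIM (what is proved, stated in full; the proofs are below) =====
def Claim_equal_GetStringIndent : Prop := ∀ (stringa : String) (indent : Int), Dom_GetStringIndent stringa indent → Pre_GetStringIndent stringa indent → Spec_GetStringIndent stringa indent (GetStringIndent stringa indent)

-- ===== LEMMAS AND PROOFS =====
lemma GetStringIndentGo_eq (l : List Char) (indent cnt : Int) :
    GetStringIndentGo l indent 0 cnt =
      (if (l.dropWhile (· == ' ')).isEmpty then none
       else some (PySem.Int.floordiv
         (cnt + ((l.length : Int) - ((l.dropWhile (· == ' ')).length : Int))) indent)) := by
  induction l generalizing cnt with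
  | nil => simp [GetStringIndentGo]
  | cons c rest ih =>
    by_cases hc : c = ' '
    · subst hc
      have h1 : GetStringIndentGo (' ' :: rest) indent 0 cnt
          = GetStringIndentGo rest indent 0 (cnt + 1) := by
        simp [GetStringIndentGo]
      have h2 : (' ' :: rest).dropWhile (· == ' ') = rest.dropWhile (· == ' ') := by
        simp [List.dropWhile]
      rw [h1, ih, h2]
      split
      · rfl
      · congr 1
        congr 1
        simp only [List.length_cons]
        push_cast
        ring
    · have hb : (c == ' ') = false := by simp [hc]
      simp [GetStringIndentGo, hc, List.dropWhile_cons_of_neg, hb]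

-- ===== VERDICT (by name: the statement is the Claim_ definition above) =====
theorem GetStringIndent_spec : Claim_equal_GetStringIndent := by
  intro stringa indent _ _
  unfold Spec_GetStringIndent GetStringIndent GetStringIndent_alt
  rw [GetStringIndentGo_eq]
  simp
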